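-- pv_equiv track=rewrite | github.com/KChen-lab/MEDALT | SP1_SCT_UTIL.py | distcalc
-- ===== SOURCE A (Python) =====
-- import copy
--
-- def distcalc(node1, node2):
--     assert len(node1) == len(node2)
--     d = 0
--     diff = copy.deepcopy(node1) ##########################
--     for i in range(0, len(node2)):
--         diff[i] = diff[i] - node2[i]
--     while diff:
--         if   diff[0] == 0: diff.pop(0)
--         elif diff[0] >  0:
--             for i in range(0, len(diff)):
--                 if diff[i] > 0: diff[i] = diff[i] - 1
--                 else: break
--             d = d+1
--         elif diff[0] <  0:
--             for i in range(0, len(diff)):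
--                 if diff[i] < 0: diff[i] = diff[i] + 1
--                 else: break
--             d = d+1
--     return d
-- ===== SOURCE B (Python) =====
-- def distcalc(node1, node2):
--     assert len(node1) == len(node2)
--     d = 0
--     prev = 0
--     for a, b in zip(node1, node2):
--         x = a - b
--         d += max(max(x, 0) - max(prev, 0), 0) + max(max(-x, 0) - max(-prev, 0), 0)
--         prev = x
--     return d
-- ===== Notes on version B (the rewrite author's own statement) =====
-- stated objective: faster
-- what changed: Replaces A's step-by-step simulation (repeatedly decrementing the leading same-sign run of the difference vector, one unit per iteration) by a single linear pass that sums the positive rises of the positive and negative parts of the difference profile (the closed-form MED formula).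
import Mathlib
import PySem

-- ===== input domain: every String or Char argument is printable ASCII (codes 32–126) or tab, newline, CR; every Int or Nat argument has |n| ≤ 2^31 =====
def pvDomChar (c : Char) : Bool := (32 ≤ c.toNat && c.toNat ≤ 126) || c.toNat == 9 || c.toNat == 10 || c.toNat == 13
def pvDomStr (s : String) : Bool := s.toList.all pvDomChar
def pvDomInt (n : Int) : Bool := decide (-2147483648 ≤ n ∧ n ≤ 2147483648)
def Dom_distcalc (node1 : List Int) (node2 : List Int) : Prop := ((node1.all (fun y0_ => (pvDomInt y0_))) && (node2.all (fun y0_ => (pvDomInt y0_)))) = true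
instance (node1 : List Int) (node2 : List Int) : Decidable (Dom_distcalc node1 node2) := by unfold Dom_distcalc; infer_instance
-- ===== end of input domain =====

-- B replaces A's unit-step simulation of the while loop by a one-pass closed-form sum (asymptotically faster).

-- ===== PORT A =====
-- the elementwise subtraction loop `for i: diff[i] -= node2[i]` (extra trailing
-- elements of node1 are kept, as in Python; a too-short node1 is outside Pre_)
def pvSubDiff : List Int → List Int → List Int
  | xs, [] => xs
  | [], _ :: _ => []
  | x :: xs, y :: ys => (x - y) :: pvSubDiff xs ys

-- `for i in range(len(diff)): if diff[i] > 0: diff[i] -= 1 else: break`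
def pvDecPos : List Int → List Int
  | [] => []
  | x :: xs => if x > 0 then (x - 1) :: pvDecPos xs else x :: xs

-- `for i in range(len(diff)): if diff[i] < 0: diff[i] += 1 else: break`
def pvDecNeg : List Int → List Int
  | [] => []
  | x :: xs => if x < 0 then (x + 1) :: pvDecNeg xs else x :: xs

def pvMeasure (l : List Int) : Nat := (l.map Int.natAbs).sum + l.length

theorem pvDecPos_measure_le : ∀ l : List Int, pvMeasure (pvDecPos l) ≤ pvMeasure l := by
  intro l
  induction l with
  | nil => simp [pvDecPos]
  | cons x xs ih =>
    simp only [pvDecPos]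
    split
    · simp only [pvMeasure, List.map, List.sum_cons, List.length_cons] at *
      have : (x - 1).natAbs ≤ x.natAbs := by omega
      omega
    · exact le_refl _

theorem pvDecNeg_measure_le : ∀ l : List Int, pvMeasure (pvDecNeg l) ≤ pvMeasure l := by
  intro l
  induction l with
  | nil => simp [pvDecNeg]
  | cons x xs ih =>
    simp only [pvDecNeg]
    split
    · simp only [pvMeasure, List.map, List.sum_cons, List.length_cons] at *
      have : (x + 1).natAbs ≤ x.natAbs := by omega
      omega
    · exact le_refl _

-- the `while diff:` loop of A
def pvLoopA (d : Int) (diff : List Int) : Int :=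
  match h : diff with
  | [] => d
  | x :: xs =>
    if hx : x = 0 then pvLoopA d xs
    else if hp : x > 0 then pvLoopA (d + 1) (pvDecPos (x :: xs))
    else pvLoopA (d + 1) (pvDecNeg (x :: xs))
termination_by pvMeasure diff
decreasing_by
  · simp only [pvMeasure, List.map, List.sum_cons, List.length_cons]; omega
  · have h1 := pvDecPos_measure_le xs
    simp only [pvDecPos, if_pos hp, pvMeasure, List.map, List.sum_cons, List.length_cons] at *
    have : (x - 1).natAbs < x.natAbs := by omega
    omega
  · have h1 := pvDecNeg_measure_le xs
    have hneg : x < 0 := by omega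
    simp only [pvDecNeg, if_pos hneg, pvMeasure, List.map, List.sum_cons, List.length_cons] at *
    have : (x + 1).natAbs < x.natAbs := by omega
    omega

def distcalc (node1 : List Int) (node2 : List Int) : Int :=
  pvLoopA 0 (pvSubDiff node1 node2)

-- ===== PORT B =====
-- the `for a, b in zip(node1, node2)` accumulation of Source B
def pvMedGo (d : Int) (prev : Int) : List (Int × Int) → Int
  | [] => d
  | (a, b) :: rest =>
    let x := a - b
    pvMedGo (d + (max (max x 0 - max prev 0) 0 + max (max (-x) 0 - max (-prev) 0) 0)) x rest

def distcalc_alt (node1 : List Int) (node2 : List Int) : Int :=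
  pvMedGo 0 0 (node1.zip node2)

-- ===== PRECONDITION & SPEC =====
-- A's `assert len(node1) == len(node2)` raises AssertionError on unequal lengths.
def Pre_distcalc (node1 : List Int) (node2 : List Int) : Prop := node1.length = node2.length
instance (node1 : List Int) (node2 : List Int) : Decidable (Pre_distcalc node1 node2) := by unfold Pre_distcalc; infer_instance
def pvWitness_distcalc : List Int × List Int := ([1, -2, 0, 3], [0, 1, 0, 1])

def Spec_distcalc (node1 : List Int) (node2 : List Int) (out : Int) : Prop := out = distcalc_alt node1 node2
instance (node1 : List Int) (node2 : List Int) (out : Int) : Decidable (Spec_distcalc node1 node2 out) := by unfold Spec_distcalc; infer_instance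

-- ===== CLAIM (what is proved, stated in full; the proofs are below) =====
def Claim_equal_distcalc : Prop := ∀ (node1 : List Int) (node2 : List Int), Dom_distcalc node1 node2 → Pre_distcalc node1 node2 → Spec_distcalc node1 node2 (distcalc node1 node2)

-- ===== LEMMAS AND PROOFS =====

-- pure one-pass MED value of a difference list, with the previous element carried
def pvMed (prev : Int) : List Int → Int
  | [] => 0
  | x :: xs => max (max x 0 - max prev 0) 0 + max (max (-x) 0 - max (-prev) 0) 0 + pvMed x xs

theorem pvMedGo_eq (l : List (Int × Int)) : ∀ d prev,
    pvMedGo d prev l = d + pvMed prev (l.map (fun p => p.1 - p.2)) := by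
  induction l with
  | nil => intro d prev; simp [pvMedGo, pvMed]
  | cons p rest ih =>
    intro d prev
    obtain ⟨a, b⟩ := p
    simp only [pvMedGo, List.map, pvMed, ih]
    ring

theorem pvSubDiff_eq_map : ∀ (n1 n2 : List Int), n1.length = n2.length →
    pvSubDiff n1 n2 = (n1.zip n2).map (fun p => p.1 - p.2) := by
  intro n1
  induction n1 with
  | nil => intro n2 h; cases n2 <;> simp_all [pvSubDiff]
  | cons x xs ih =>
    intro n2 h
    cases n2 with
    | nil => simp at h
    | cons y ys =>
      simp only [pvSubDiff, List.zip_cons_cons, List.map]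
      rw [ih ys (by simpa using h)]

-- decrementing a positive prefix shifts pvMed's carried bound by one
theorem pvMed_decPos (l : List Int) : ∀ prev : Int, 1 ≤ prev →
    pvMed (prev - 1) (pvDecPos l) = pvMed prev l := by
  induction l with
  | nil => intro prev _; simp [pvDecPos, pvMed]
  | cons x xs ih =>
    intro prev hp
    simp only [pvDecPos]
    split
    · rename_i hx
      simp only [pvMed]
      rw [ih (x) (by omega)]
      congr 1
      have h1 : max (x - 1) 0 = x - 1 := by omega
      have h2 : max x 0 = x := by omega
      have h3 : max (-(x - 1)) 0 = 0 := by omega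
      have h4 : max (-x) 0 = 0 := by omega
      have h5 : max (prev - 1) 0 = prev - 1 := by omega
      have h6 : max prev 0 = prev := by omega
      have h7 : max (-(prev - 1)) 0 = 0 := by omega
      have h8 : max (-prev) 0 = 0 := by omega
      rw [h1, h2, h3, h4, h5, h6, h7, h8]
      omega
    · rename_i hx
      simp only [pvMed]
      congr 1
      have h2 : max x 0 = 0 := by omega
      have h5 : max (prev - 1) 0 = prev - 1 := by omega
      have h6 : max prev 0 = prev := by omega
      have h7 : max (-(prev - 1)) 0 = 0 := by omega
      have h8 : max (-prev) 0 = 0 := by omega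
      rw [h2, h5, h6, h7, h8]
      omega

theorem pvMed_decNeg (l : List Int) : ∀ prev : Int, prev ≤ -1 →
    pvMed (prev + 1) (pvDecNeg l) = pvMed prev l := by
  induction l with
  | nil => intro prev _; simp [pvDecNeg, pvMed]
  | cons x xs ih =>
    intro prev hp
    simp only [pvDecNeg]
    split
    · rename_i hx
      simp only [pvMed]
      rw [ih (x) (by omega)]
      congr 1
      have h1 : max (x + 1) 0 = 0 := by omega
      have h2 : max x 0 = 0 := by omega
      have h3 : max (-(x + 1)) 0 = -(x + 1) := by omega
      have h4 : max (-x) 0 = -x := by omega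
      have h5 : max (prev + 1) 0 = 0 := by omega
      have h6 : max prev 0 = 0 := by omega
      have h7 : max (-(prev + 1)) 0 = -(prev + 1) := by omega
      have h8 : max (-prev) 0 = -prev := by omega
      rw [h1, h2, h3, h4, h5, h6, h7, h8]
      omega
    · rename_i hx
      simp only [pvMed]
      congr 1
      have h4 : max (-x) 0 = 0 := by omega
      have h5 : max (prev + 1) 0 = 0 := by omega
      have h6 : max prev 0 = 0 := by omega
      have h7 : max (-(prev + 1)) 0 = -(prev + 1) := by omega
      have h8 : max (-prev) 0 = -prev := by omega
      rw [h4, h5, h6, h7, h8]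
      omega

-- A's loop computes d + the closed-form pvMed of the remaining difference list
theorem pvLoopA_eq : ∀ (d : Int) (diff : List Int), pvLoopA d diff = d + pvMed 0 diff := by
  intro d diff
  induction d, diff using pvLoopA.induct with
  | case1 d => simp [pvLoopA, pvMed]
  | case2 d xs ih =>
    rw [pvLoopA]
    rw [ih]
    simp [pvMed]
  | case3 d x xs hx hp ih =>
    rw [pvLoopA]
    simp only [hx, hp, dif_neg, dif_pos, not_false_iff]
    rw [ih]
    have step : pvMed 0 (pvDecPos (x :: xs)) = pvMed 0 (x :: xs) - 1 := by
      have hform : pvDecPos (x :: xs) = (x - 1) :: pvDecPos xs := by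
        simp [pvDecPos, hp]
      rw [hform]
      simp only [pvMed]
      rw [pvMed_decPos xs x (by omega)]
      have a1 : max (x - 1) 0 = x - 1 := by omega
      have a2 : max x 0 = x := by omega
      have a3 : max (-(x - 1)) 0 = 0 := by omega
      have a4 : max (-x) 0 = 0 := by omega
      have a5 : max (0 : Int) 0 = 0 := by omega
      have a6 : max (-(0 : Int)) 0 = 0 := by omega
      rw [a1, a2, a3, a4, a5, a6]
      omega
    omega
  | case4 d x xs hx hp ih =>
    rw [pvLoopA]
    simp only [hx, hp, dif_neg, not_false_iff]
    rw [ih]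
    have hn : x < 0 := by omega
    have step : pvMed 0 (pvDecNeg (x :: xs)) = pvMed 0 (x :: xs) - 1 := by
      have hform : pvDecNeg (x :: xs) = (x + 1) :: pvDecNeg xs := by
        simp [pvDecNeg, hn]
      rw [hform]
      simp only [pvMed]
      rw [pvMed_decNeg xs x (by omega)]
      have a1 : max (x + 1) 0 = 0 := by omega
      have a2 : max x 0 = 0 := by omega
      have a3 : max (-(x + 1)) 0 = -(x + 1) := by omega
      have a4 : max (-x) 0 = -x := by omega
      have a5 : max (0 : Int) 0 = 0 := by omega
      have a6 : max (-(0 : Int)) 0 = 0 := by omega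
      rw [a1, a2, a3, a4, a5, a6]
      omega
    omega

-- ===== VERDICT (by name: the statement is the Claim_ definition above) =====
theorem distcalc_spec : Claim_equal_distcalc := by
  intro node1 node2 _ hpre
  unfold Spec_distcalc distcalc distcalc_alt
  rw [pvLoopA_eq _ _, pvSubDiff_eq_map node1 node2 hpre, pvMedGo_eq]
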